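-- pv_equiv track=rewrite | github.com/MidwestJohn/line-lead-qsr-assistant | backend/tools/ragie_tools.py | _determine_equipment_type
-- ===== SOURCE A (Python) =====
-- def _determine_equipment_type(equipment_name: str, content: str) -> str:
--     """Determine equipment type from name and content"""
--
--     equipment_name_lower = equipment_name.lower()
--     content_lower = content.lower()
--
--     if any(keyword in equipment_name_lower for keyword in ['fryer', 'fry']):
--         return "fryer"
--     elif any(keyword in equipment_name_lower for keyword in ['grill', 'griddle']):
--         return "grill"
--     elif any(keyword in equipment_name_lower for keyword in ['oven', 'baker']):
--         return "oven"
--     elif any(keyword in equipment_name_lower for keyword in ['freezer', 'refrigerator', 'cooler']):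
--         return "cooling"
--     elif any(keyword in equipment_name_lower for keyword in ['mixer', 'blend']):
--         return "mixer"
--     elif any(keyword in equipment_name_lower for keyword in ['ice', 'dispenser']):
--         return "ice_machine"
--     else:
--         return "general"
-- ===== SOURCE B (Python) =====
-- # Each keyword is ranked by the priority of its category; the result is the
-- # label of the lowest-ranked keyword occurring in the name (min over matches),
-- # which coincides with the first-match order of the original ladder.
-- _KEYWORD_RANK = {
--     "fryer": 0, "fry": 0,
--     "grill": 1, "griddle": 1,
--     "oven": 2, "baker": 2,
--     "freezer": 3, "refrigerator": 3, "cooler": 3,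
--     "mixer": 4, "blend": 4,
--     "ice": 5, "dispenser": 5,
-- }
-- _LABELS = ["fryer", "grill", "oven", "cooling", "mixer", "ice_machine"]
--
--
-- def _determine_equipment_type(equipment_name: str, content: str) -> str:
--     """Determine equipment type from name and content"""
--     name = equipment_name.lower()
--     content.lower()  # kept: the original also lowers content (unused)
--     ranks = [rank for kw, rank in _KEYWORD_RANK.items() if kw in name]
--     return _LABELS[min(ranks)] if ranks else "general"
-- ===== Notes on version B (the rewrite author's own statement) =====
-- stated objective: alternative
-- what changed: Instead of an ordered if-elif ladder with early exit, B ranks every keyword by category priority, collects the ranks of all keywords occurring in the lowered name in one filtering pass, and returns the label of the minimum rank (or 'general' if none matched).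
import Mathlib
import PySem

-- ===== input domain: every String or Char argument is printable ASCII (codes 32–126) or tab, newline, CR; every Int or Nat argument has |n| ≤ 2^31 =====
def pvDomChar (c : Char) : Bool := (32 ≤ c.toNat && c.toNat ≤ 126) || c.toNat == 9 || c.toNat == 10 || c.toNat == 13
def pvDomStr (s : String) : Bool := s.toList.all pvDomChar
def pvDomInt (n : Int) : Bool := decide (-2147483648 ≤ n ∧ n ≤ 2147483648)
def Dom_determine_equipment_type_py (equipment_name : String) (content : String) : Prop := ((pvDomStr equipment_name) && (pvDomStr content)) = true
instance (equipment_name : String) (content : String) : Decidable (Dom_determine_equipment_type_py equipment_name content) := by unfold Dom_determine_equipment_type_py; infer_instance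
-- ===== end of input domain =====

-- B: ranks every keyword by category priority, collects the ranks of all keywords found in the name in one pass, and returns the label of the minimum rank (alternative decomposition: min-over-matches instead of first-match ladder).


-- ===== PORT A =====
-- Port of A: the if-elif ladder, literal branch by branch.
def determine_equipment_type_py (equipment_name : String) (content : String) : String :=
  let equipment_name_lower := PySem.Str.lower equipment_name
  let _content_lower := PySem.Str.lower content
  if ["fryer", "fry"].any (fun keyword => PySem.Str.isIn keyword equipment_name_lower) then
    "fryer"
  else if ["grill", "griddle"].any (fun keyword => PySem.Str.isIn keyword equipment_name_lower) then
    "grill"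
  else if ["oven", "baker"].any (fun keyword => PySem.Str.isIn keyword equipment_name_lower) then
    "oven"
  else if ["freezer", "refrigerator", "cooler"].any (fun keyword => PySem.Str.isIn keyword equipment_name_lower) then
    "cooling"
  else if ["mixer", "blend"].any (fun keyword => PySem.Str.isIn keyword equipment_name_lower) then
    "mixer"
  else if ["ice", "dispenser"].any (fun keyword => PySem.Str.isIn keyword equipment_name_lower) then
    "ice_machine"
  else
    "general"

-- ===== PORT B =====
-- _KEYWORD_RANK.items() in insertion order
def keywordRank : List (String × Int) :=
  [ ("fryer", 0), ("fry", 0),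
    ("grill", 1), ("griddle", 1),
    ("oven", 2), ("baker", 2),
    ("freezer", 3), ("refrigerator", 3), ("cooler", 3),
    ("mixer", 4), ("blend", 4),
    ("ice", 5), ("dispenser", 5) ]

def labelsB : List String := ["fryer", "grill", "oven", "cooling", "mixer", "ice_machine"]

def determine_equipment_type_py_alt (equipment_name : String) (content : String) : String :=
  let name := PySem.Str.lower equipment_name
  let _ := PySem.Str.lower content
  let ranks := (keywordRank.filter (fun p => PySem.Str.isIn p.1 name)).map (fun p => p.2)
  -- _LABELS[min(ranks)] if ranks else "general"; the index is always in range (ranks ⊆ 0..5)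
  match PySem.List.min? ranks (fun x => x) with
  | none => "general"
  | some m => (PySem.List.pyGet? labelsB m).getD ""

-- ===== PRECONDITION & SPEC =====
def Spec_determine_equipment_type_py (equipment_name : String) (content : String) (out : String) : Prop := out = determine_equipment_type_py_alt equipment_name content
instance (equipment_name : String) (content : String) (out : String) : Decidable (Spec_determine_equipment_type_py equipment_name content out) := by unfold Spec_determine_equipment_type_py; infer_instance

-- ===== CLAIM (what is proved, stated in full; the proofs are below) =====
def Claim_equal_determine_equipment_type_py : Prop := ∀ (equipment_name : String) (content : String), Dom_determine_equipment_type_py equipment_name content → Spec_determine_equipment_type_py equipment_name content (determine_equipment_type_py equipment_name content)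

-- ===== LEMMAS AND PROOFS =====

theorem pv_min_eq {ranks : List Int} {j : Int} (hj : j ∈ ranks)
    (hge : ∀ x ∈ ranks, j ≤ x) :
    PySem.List.min? ranks (fun x => x) = some j := by
  cases h : PySem.List.min? ranks (fun x => x) with
  | none =>
    rw [PySem.List.min?_eq_none_iff] at h
    subst h; cases hj
  | some m =>
    have hm : m ∈ ranks := PySem.List.min?_mem h
    have h1 := PySem.List.min?_isMin h j hj
    have h2 := hge m hm
    have : m = j := le_antisymm h1 h2
    rw [this]

def ranksOf (N : String) : List Int :=
  (keywordRank.filter (fun p => PySem.Str.isIn p.1 N)).map (fun p => p.2)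

theorem ranks_cases (N : String) (x : Int) (hx : x ∈ ranksOf N) :
    (x = 0 ∧ (PySem.Str.isIn "fryer" N || PySem.Str.isIn "fry" N) = true) ∨ (x = 1 ∧ (PySem.Str.isIn "grill" N || PySem.Str.isIn "griddle" N) = true) ∨ (x = 2 ∧ (PySem.Str.isIn "oven" N || PySem.Str.isIn "baker" N) = true) ∨ (x = 3 ∧ (PySem.Str.isIn "freezer" N || (PySem.Str.isIn "refrigerator" N || PySem.Str.isIn "cooler" N)) = true) ∨ (x = 4 ∧ (PySem.Str.isIn "mixer" N || PySem.Str.isIn "blend" N) = true) ∨ (x = 5 ∧ (PySem.Str.isIn "ice" N || PySem.Str.isIn "dispenser" N) = true) := by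
  simp only [ranksOf, keywordRank, List.mem_map, List.mem_filter] at hx
  rcases hx with ⟨⟨kw, r⟩, ⟨hm, hp⟩, rfl⟩
  fin_cases hm <;> simp_all

-- ===== VERDICT (by name: the statement is the Claim_ definition above) =====
theorem determine_equipment_type_py_spec : Claim_equal_determine_equipment_type_py := by
  intro equipment_name content _hD
  unfold Spec_determine_equipment_type_py
  simp only [determine_equipment_type_py, determine_equipment_type_py_alt,
    List.any_cons, List.any_nil, Bool.or_false]
  set N := PySem.Str.lower equipment_name with hN
  have hr : (keywordRank.filter (fun p => PySem.Str.isIn p.1 N)).map (fun p => p.2) = ranksOf N := rfl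
  rw [hr]
  by_cases hg0 : (PySem.Str.isIn "fryer" N || PySem.Str.isIn "fry" N) = true
  · have hmem : (0 : Int) ∈ ranksOf N := by
      simp only [ranksOf, keywordRank, List.mem_map, List.mem_filter]
      rcases Bool.or_eq_true_iff.mp hg0 with hk | hk
      · exact ⟨("fryer", 0), ⟨by decide, hk⟩, rfl⟩
      · exact ⟨("fry", 0), ⟨by decide, hk⟩, rfl⟩
    have hge : ∀ x ∈ ranksOf N, (0 : Int) ≤ x := by
      intro x hx
      rcases ranks_cases N x hx with ⟨rfl,hc⟩|⟨rfl,hc⟩|⟨rfl,hc⟩|⟨rfl,hc⟩|⟨rfl,hc⟩|⟨rfl,hc⟩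
      · omega
      · omega
      · omega
      · omega
      · omega
      · omega
    rw [pv_min_eq hmem hge]
    rw [if_pos hg0]; rfl
  -- group 0 unmatched
  by_cases hg1 : (PySem.Str.isIn "grill" N || PySem.Str.isIn "griddle" N) = true
  · have hmem : (1 : Int) ∈ ranksOf N := by
      simp only [ranksOf, keywordRank, List.mem_map, List.mem_filter]
      rcases Bool.or_eq_true_iff.mp hg1 with hk | hk
      · exact ⟨("grill", 1), ⟨by decide, hk⟩, rfl⟩
      · exact ⟨("griddle", 1), ⟨by decide, hk⟩, rfl⟩
    have hge : ∀ x ∈ ranksOf N, (1 : Int) ≤ x := by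
      intro x hx
      rcases ranks_cases N x hx with ⟨rfl,hc⟩|⟨rfl,hc⟩|⟨rfl,hc⟩|⟨rfl,hc⟩|⟨rfl,hc⟩|⟨rfl,hc⟩
      · rw [Bool.not_eq_true] at hg0; rw [hg0] at hc; cases hc
      · omega
      · omega
      · omega
      · omega
      · omega
    rw [pv_min_eq hmem hge]
    rw [if_neg hg0, if_pos hg1]; rfl
  -- group 1 unmatched
  by_cases hg2 : (PySem.Str.isIn "oven" N || PySem.Str.isIn "baker" N) = true
  · have hmem : (2 : Int) ∈ ranksOf N := by
      simp only [ranksOf, keywordRank, List.mem_map, List.mem_filter]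
      rcases Bool.or_eq_true_iff.mp hg2 with hk | hk
      · exact ⟨("oven", 2), ⟨by decide, hk⟩, rfl⟩
      · exact ⟨("baker", 2), ⟨by decide, hk⟩, rfl⟩
    have hge : ∀ x ∈ ranksOf N, (2 : Int) ≤ x := by
      intro x hx
      rcases ranks_cases N x hx with ⟨rfl,hc⟩|⟨rfl,hc⟩|⟨rfl,hc⟩|⟨rfl,hc⟩|⟨rfl,hc⟩|⟨rfl,hc⟩
      · rw [Bool.not_eq_true] at hg0; rw [hg0] at hc; cases hc
      · rw [Bool.not_eq_true] at hg1; rw [hg1] at hc; cases hc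
      · omega
      · omega
      · omega
      · omega
    rw [pv_min_eq hmem hge]
    rw [if_neg hg0, if_neg hg1, if_pos hg2]; rfl
  -- group 2 unmatched
  by_cases hg3 : (PySem.Str.isIn "freezer" N || (PySem.Str.isIn "refrigerator" N || PySem.Str.isIn "cooler" N)) = true
  · have hmem : (3 : Int) ∈ ranksOf N := by
      simp only [ranksOf, keywordRank, List.mem_map, List.mem_filter]
      rcases Bool.or_eq_true_iff.mp hg3 with hk | hk
      · exact ⟨("freezer", 3), ⟨by decide, hk⟩, rfl⟩
      · rcases Bool.or_eq_true_iff.mp hk with hk | hk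
        · exact ⟨("refrigerator", 3), ⟨by decide, hk⟩, rfl⟩
        · exact ⟨("cooler", 3), ⟨by decide, hk⟩, rfl⟩
    have hge : ∀ x ∈ ranksOf N, (3 : Int) ≤ x := by
      intro x hx
      rcases ranks_cases N x hx with ⟨rfl,hc⟩|⟨rfl,hc⟩|⟨rfl,hc⟩|⟨rfl,hc⟩|⟨rfl,hc⟩|⟨rfl,hc⟩
      · rw [Bool.not_eq_true] at hg0; rw [hg0] at hc; cases hc
      · rw [Bool.not_eq_true] at hg1; rw [hg1] at hc; cases hc
      · rw [Bool.not_eq_true] at hg2; rw [hg2] at hc; cases hc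
      · omega
      · omega
      · omega
    rw [pv_min_eq hmem hge]
    rw [if_neg hg0, if_neg hg1, if_neg hg2, if_pos hg3]; rfl
  -- group 3 unmatched
  by_cases hg4 : (PySem.Str.isIn "mixer" N || PySem.Str.isIn "blend" N) = true
  · have hmem : (4 : Int) ∈ ranksOf N := by
      simp only [ranksOf, keywordRank, List.mem_map, List.mem_filter]
      rcases Bool.or_eq_true_iff.mp hg4 with hk | hk
      · exact ⟨("mixer", 4), ⟨by decide, hk⟩, rfl⟩
      · exact ⟨("blend", 4), ⟨by decide, hk⟩, rfl⟩
    have hge : ∀ x ∈ ranksOf N, (4 : Int) ≤ x := by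
      intro x hx
      rcases ranks_cases N x hx with ⟨rfl,hc⟩|⟨rfl,hc⟩|⟨rfl,hc⟩|⟨rfl,hc⟩|⟨rfl,hc⟩|⟨rfl,hc⟩
      · rw [Bool.not_eq_true] at hg0; rw [hg0] at hc; cases hc
      · rw [Bool.not_eq_true] at hg1; rw [hg1] at hc; cases hc
      · rw [Bool.not_eq_true] at hg2; rw [hg2] at hc; cases hc
      · rw [Bool.not_eq_true] at hg3; rw [hg3] at hc; cases hc
      · omega
      · omega
    rw [pv_min_eq hmem hge]
    rw [if_neg hg0, if_neg hg1, if_neg hg2, if_neg hg3, if_pos hg4]; rfl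
  -- group 4 unmatched
  by_cases hg5 : (PySem.Str.isIn "ice" N || PySem.Str.isIn "dispenser" N) = true
  · have hmem : (5 : Int) ∈ ranksOf N := by
      simp only [ranksOf, keywordRank, List.mem_map, List.mem_filter]
      rcases Bool.or_eq_true_iff.mp hg5 with hk | hk
      · exact ⟨("ice", 5), ⟨by decide, hk⟩, rfl⟩
      · exact ⟨("dispenser", 5), ⟨by decide, hk⟩, rfl⟩
    have hge : ∀ x ∈ ranksOf N, (5 : Int) ≤ x := by
      intro x hx
      rcases ranks_cases N x hx with ⟨rfl,hc⟩|⟨rfl,hc⟩|⟨rfl,hc⟩|⟨rfl,hc⟩|⟨rfl,hc⟩|⟨rfl,hc⟩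
      · rw [Bool.not_eq_true] at hg0; rw [hg0] at hc; cases hc
      · rw [Bool.not_eq_true] at hg1; rw [hg1] at hc; cases hc
      · rw [Bool.not_eq_true] at hg2; rw [hg2] at hc; cases hc
      · rw [Bool.not_eq_true] at hg3; rw [hg3] at hc; cases hc
      · rw [Bool.not_eq_true] at hg4; rw [hg4] at hc; cases hc
      · omega
    rw [pv_min_eq hmem hge]
    rw [if_neg hg0, if_neg hg1, if_neg hg2, if_neg hg3, if_neg hg4, if_pos hg5]; rfl
  -- group 5 unmatched
  have hnil : ranksOf N = [] := by
    rw [List.eq_nil_iff_forall_not_mem]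
    intro x hx
    rcases ranks_cases N x hx with ⟨_,hc⟩|⟨_,hc⟩|⟨_,hc⟩|⟨_,hc⟩|⟨_,hc⟩|⟨_,hc⟩
    · rw [Bool.not_eq_true] at hg0; rw [hg0] at hc; cases hc
    · rw [Bool.not_eq_true] at hg1; rw [hg1] at hc; cases hc
    · rw [Bool.not_eq_true] at hg2; rw [hg2] at hc; cases hc
    · rw [Bool.not_eq_true] at hg3; rw [hg3] at hc; cases hc
    · rw [Bool.not_eq_true] at hg4; rw [hg4] at hc; cases hc
    · rw [Bool.not_eq_true] at hg5; rw [hg5] at hc; cases hc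
  rw [hnil]
  rw [if_neg hg0, if_neg hg1, if_neg hg2, if_neg hg3, if_neg hg4, if_neg hg5]; rfl
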